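-- pv_equiv track=rewrite | github.com/lailamacho/integrage_data_an | funkce.py | col_to_topic
-- ===== SOURCE A (Python) =====
-- def col_to_topic(col: str) -> str:
--     """
--     Pro zadaný název sloupce v csv exportu vrací název příslušné kompetence (název dotazníku).
--     """
--     dovednosti_sub_topics = {"sub_topic_3": "Odborné dovednosti a jejich rozvoj",
--                 "sub_topic_4": "Flexibilita",
--                 "sub_topic_5": "Zdravotní stav",
--                 "sub_topic_6": "Sebedůvěra a motivace",
--                 "sub_topic_7": "Finanční a sociální bariéry"}
--
--     os_rozvoj_sub_topics = {"sub_topic_8": "Životní spokojenost",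
--                             "sub_topic_12": "Pracovní spokojenost",
--                             "sub_topic_19": "Pracovní benefity",
--                             "sub_topic_20": "Problémy na pracovišti"}
--
--     tech_zdatnost_sub_topics = {"sub_topic_13": "Základní počítačové dovednosti",
--                                 "sub_topic_14": "Práce s kancelářským softwarem",
--                                 "sub_topic_15": "Internetové dovednosti",
--                                 "sub_topic_16": "Komunikace a sociální sítě",
--                                 "sub_topic_17": "Řešení problémů a správa systému",
--                                 "sub_topic_18": "Produktivita a digitální tvorba"}
--
--     dict_dict = {"Dovednosti pro začlenění na pracovišti": dovednosti_sub_topics,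
--                  "Osobní rozvoj a blahobyt": os_rozvoj_sub_topics,
--                  "Technologická zdatnost": tech_zdatnost_sub_topics}
--
--     for name, values in dict_dict.items():
--         if col in values:
--             return name
-- ===== SOURCE B (Python) =====
-- _TOPIC_BY_SUB = {
--     "sub_topic_3": "Dovednosti pro začlenění na pracovišti",
--     "sub_topic_4": "Dovednosti pro začlenění na pracovišti",
--     "sub_topic_5": "Dovednosti pro začlenění na pracovišti",
--     "sub_topic_6": "Dovednosti pro začlenění na pracovišti",
--     "sub_topic_7": "Dovednosti pro začlenění na pracovišti",
--     "sub_topic_8": "Osobní rozvoj a blahobyt",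
--     "sub_topic_12": "Osobní rozvoj a blahobyt",
--     "sub_topic_19": "Osobní rozvoj a blahobyt",
--     "sub_topic_20": "Osobní rozvoj a blahobyt",
--     "sub_topic_13": "Technologická zdatnost",
--     "sub_topic_14": "Technologická zdatnost",
--     "sub_topic_15": "Technologická zdatnost",
--     "sub_topic_16": "Technologická zdatnost",
--     "sub_topic_17": "Technologická zdatnost",
--     "sub_topic_18": "Technologická zdatnost",
-- }
--
-- def col_to_topic(col: str) -> str:
--     return _TOPIC_BY_SUB.get(col)
-- ===== Notes on version B (the rewrite author's own statement) =====
-- stated objective: simpler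
-- what changed: Replaced the loop over three nested sub-topic dicts with membership tests by one flat dict mapping each sub_topic key directly to its parent topic, so the function is a single .get lookup.
import Mathlib
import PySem

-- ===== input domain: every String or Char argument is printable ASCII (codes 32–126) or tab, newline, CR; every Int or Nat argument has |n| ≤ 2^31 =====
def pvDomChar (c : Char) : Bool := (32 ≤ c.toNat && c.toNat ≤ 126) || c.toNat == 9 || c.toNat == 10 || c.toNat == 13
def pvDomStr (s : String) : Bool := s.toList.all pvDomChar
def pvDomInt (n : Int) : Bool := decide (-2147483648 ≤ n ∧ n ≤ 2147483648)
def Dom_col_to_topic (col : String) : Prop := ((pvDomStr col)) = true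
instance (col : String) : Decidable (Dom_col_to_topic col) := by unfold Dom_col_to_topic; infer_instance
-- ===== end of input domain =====

-- B replaces the loop over three nested dicts by a single flat key→topic dict lookup (simpler).

-- ===== PORT A =====
def pvDovednosti : PySem.Dict String String := PySem.Dict.ofList
  [("sub_topic_3", "Odborné dovednosti a jejich rozvoj"),
   ("sub_topic_4", "Flexibilita"),
   ("sub_topic_5", "Zdravotní stav"),
   ("sub_topic_6", "Sebedůvěra a motivace"),
   ("sub_topic_7", "Finanční a sociální bariéry")]

def pvOsRozvoj : PySem.Dict String String := PySem.Dict.ofList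
  [("sub_topic_8", "Životní spokojenost"),
   ("sub_topic_12", "Pracovní spokojenost"),
   ("sub_topic_19", "Pracovní benefity"),
   ("sub_topic_20", "Problémy na pracovišti")]

def pvTechZdatnost : PySem.Dict String String := PySem.Dict.ofList
  [("sub_topic_13", "Základní počítačové dovednosti"),
   ("sub_topic_14", "Práce s kancelářským softwarem"),
   ("sub_topic_15", "Internetové dovednosti"),
   ("sub_topic_16", "Komunikace a sociální sítě"),
   ("sub_topic_17", "Řešení problémů a správa systému"),
   ("sub_topic_18", "Produktivita a digitální tvorba")]

def pvDictDict : PySem.Dict String (PySem.Dict String String) := PySem.Dict.ofList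
  [("Dovednosti pro začlenění na pracovišti", pvDovednosti),
   ("Osobní rozvoj a blahobyt", pvOsRozvoj),
   ("Technologická zdatnost", pvTechZdatnost)]

-- the `for name, values in dict_dict.items(): if col in values: return name` loop (falls off the end → None)
def pvLoopA : List (String × PySem.Dict String String) → String → Option String
  | [], _ => none
  | (name, values) :: rest, col =>
      if values.contains col then some name else pvLoopA rest col

def col_to_topic (col : String) : Option String := pvLoopA pvDictDict.items col

-- ===== PORT B =====
def pvTopicBySub : PySem.Dict String String := PySem.Dict.ofList
  [("sub_topic_3", "Dovednosti pro začlenění na pracovišti"),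
   ("sub_topic_4", "Dovednosti pro začlenění na pracovišti"),
   ("sub_topic_5", "Dovednosti pro začlenění na pracovišti"),
   ("sub_topic_6", "Dovednosti pro začlenění na pracovišti"),
   ("sub_topic_7", "Dovednosti pro začlenění na pracovišti"),
   ("sub_topic_8", "Osobní rozvoj a blahobyt"),
   ("sub_topic_12", "Osobní rozvoj a blahobyt"),
   ("sub_topic_19", "Osobní rozvoj a blahobyt"),
   ("sub_topic_20", "Osobní rozvoj a blahobyt"),
   ("sub_topic_13", "Technologická zdatnost"),
   ("sub_topic_14", "Technologická zdatnost"),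
   ("sub_topic_15", "Technologická zdatnost"),
   ("sub_topic_16", "Technologická zdatnost"),
   ("sub_topic_17", "Technologická zdatnost"),
   ("sub_topic_18", "Technologická zdatnost")]

def col_to_topic_alt (col : String) : Option String := pvTopicBySub.get? col

-- ===== PRECONDITION & SPEC =====
def Spec_col_to_topic (col : String) (out : Option String) : Prop := out = col_to_topic_alt col
instance (col : String) (out : Option String) : Decidable (Spec_col_to_topic col out) := by unfold Spec_col_to_topic; infer_instance

-- ===== CLAIM (what is proved, stated in full; the proofs are below) =====
def Claim_equal_col_to_topic : Prop := ∀ (col : String), Dom_col_to_topic col → Spec_col_to_topic col (col_to_topic col)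

-- ===== LEMMAS AND PROOFS =====

-- ===== VERDICT (by name: the statement is the Claim_ definition above) =====
set_option maxHeartbeats 2000000 in
theorem col_to_topic_spec : Claim_equal_col_to_topic := by
  intro col hdom
  clear hdom
  unfold Spec_col_to_topic
  by_cases hk0 : "sub_topic_3" = col
  · subst hk0; decide
  by_cases hk1 : "sub_topic_4" = col
  · subst hk1; decide
  by_cases hk2 : "sub_topic_5" = col
  · subst hk2; decide
  by_cases hk3 : "sub_topic_6" = col
  · subst hk3; decide
  by_cases hk4 : "sub_topic_7" = col
  · subst hk4; decide
  by_cases hk5 : "sub_topic_8" = col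
  · subst hk5; decide
  by_cases hk6 : "sub_topic_12" = col
  · subst hk6; decide
  by_cases hk7 : "sub_topic_19" = col
  · subst hk7; decide
  by_cases hk8 : "sub_topic_20" = col
  · subst hk8; decide
  by_cases hk9 : "sub_topic_13" = col
  · subst hk9; decide
  by_cases hk10 : "sub_topic_14" = col
  · subst hk10; decide
  by_cases hk11 : "sub_topic_15" = col
  · subst hk11; decide
  by_cases hk12 : "sub_topic_16" = col
  · subst hk12; decide
  by_cases hk13 : "sub_topic_17" = col
  · subst hk13; decide
  by_cases hk14 : "sub_topic_18" = col
  · subst hk14; decide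
  -- col is none of the 15 keys: both sides reduce to none
  unfold col_to_topic col_to_topic_alt
  have hI : pvDictDict.items =
      [("Dovednosti pro začlenění na pracovišti", pvDovednosti),
       ("Osobní rozvoj a blahobyt", pvOsRozvoj),
       ("Technologická zdatnost", pvTechZdatnost)] := rfl
  rw [hI]
  have c1 : pvDovednosti.contains col = false := by
    rw [show pvDovednosti = PySem.Dict.mk
      [("sub_topic_3", "Odborné dovednosti a jejich rozvoj"),
       ("sub_topic_4", "Flexibilita"),
       ("sub_topic_5", "Zdravotní stav"),
       ("sub_topic_6", "Sebedůvěra a motivace"),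
       ("sub_topic_7", "Finanční a sociální bariéry")] from rfl]
    simp [hk0, hk1, hk2, hk3, hk4]
  have c2 : pvOsRozvoj.contains col = false := by
    rw [show pvOsRozvoj = PySem.Dict.mk
      [("sub_topic_8", "Životní spokojenost"),
       ("sub_topic_12", "Pracovní spokojenost"),
       ("sub_topic_19", "Pracovní benefity"),
       ("sub_topic_20", "Problémy na pracovišti")] from rfl]
    simp [hk5, hk6, hk7, hk8]
  have c3 : pvTechZdatnost.contains col = false := by
    rw [show pvTechZdatnost = PySem.Dict.mk
      [("sub_topic_13", "Základní počítačové dovednosti"),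
       ("sub_topic_14", "Práce s kancelářským softwarem"),
       ("sub_topic_15", "Internetové dovednosti"),
       ("sub_topic_16", "Komunikace a sociální sítě"),
       ("sub_topic_17", "Řešení problémů a správa systému"),
       ("sub_topic_18", "Produktivita a digitální tvorba")] from rfl]
    simp [hk9, hk10, hk11, hk12, hk13, hk14]
  have cB : pvTopicBySub.get? col = none := by
    rw [show pvTopicBySub = PySem.Dict.mk
      [("sub_topic_3", "Dovednosti pro začlenění na pracovišti"),
       ("sub_topic_4", "Dovednosti pro začlenění na pracovišti"),
       ("sub_topic_5", "Dovednosti pro začlenění na pracovišti"),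
       ("sub_topic_6", "Dovednosti pro začlenění na pracovišti"),
       ("sub_topic_7", "Dovednosti pro začlenění na pracovišti"),
       ("sub_topic_8", "Osobní rozvoj a blahobyt"),
       ("sub_topic_12", "Osobní rozvoj a blahobyt"),
       ("sub_topic_19", "Osobní rozvoj a blahobyt"),
       ("sub_topic_20", "Osobní rozvoj a blahobyt"),
       ("sub_topic_13", "Technologická zdatnost"),
       ("sub_topic_14", "Technologická zdatnost"),
       ("sub_topic_15", "Technologická zdatnost"),
       ("sub_topic_16", "Technologická zdatnost"),
       ("sub_topic_17", "Technologická zdatnost"),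
       ("sub_topic_18", "Technologická zdatnost")] from rfl]
    simp [PySem.Dict.get?, hk0, hk1, hk2, hk3, hk4,
      hk5, hk6, hk7, hk8, hk9, hk10, hk11, hk12, hk13, hk14]
  simp [pvLoopA, c1, c2, c3, cB]
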